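-- pv_equiv track=rewrite | github.com/chenmike1986/change_pov | mention_selection/train_plm_few_shot_learning_auto_regressive_without_entities.py | prune_mention_set_dev
-- ===== SOURCE A (Python) =====
-- def prune_mention_set_dev(mention_set, focus_mention):
--     updated_mention_set=[]
--     list1 = ['his','her','our','their']
--     list2 = ['himself','herself','ourselves','themselves']
--     list3 = ['you','he','she','we','they']
--     list4 = ['you','him','her','us','them']
--     focus_mention_parts = focus_mention.lower().split()
--     focus_mention_contains_reflexive = False
--     for focus_mention_part in focus_mention_parts:
--         if focus_mention_part in list2:
--             focus_mention_contains_reflexive = True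
--             break
--
--     if (focus_mention.lower() in list1) or (focus_mention.lower().endswith('\'s')) or (focus_mention.lower().endswith('s')):
--         for mention in mention_set:
--             if (mention.lower() in list1) or (mention.lower().endswith('\'s')) or (mention.lower().endswith('s')):
--                 updated_mention_set.append(mention.lower())
--     elif focus_mention_contains_reflexive:
--         for mention in mention_set:
--             if mention.lower() in list2:
--                 updated_mention_set.append(mention.lower())
--     elif focus_mention.lower() in list3:
--         for mention in mention_set:
--             mention_parts = mention.lower().split()
--             mention_contains_reflexive = False
--             for mention_part in mention_parts:
--                 if mention_part in list2:
--                     mention_contains_reflexive = True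
--                     break
--             if (mention.lower() in list1) or (mention.lower().endswith('\'s')) or (mention.lower().endswith('s')) or (mention.lower() in list2) or (mention.lower() in list4):
--                 continue
--             elif mention_contains_reflexive:
--                 continue
--             else:
--                 updated_mention_set.append(mention.lower())
--     elif focus_mention.lower() in list4:
--         for mention in mention_set:
--             if (mention.lower() in list1) or (mention.lower().endswith('\'s')) or (mention.lower().endswith('s')) or (mention.lower() in list2) or (mention.lower() in list3):
--                 continue
--             else:
--                 updated_mention_set.append(mention.lower())
--     else:
--         has_processed = False
--         if (focus_mention.lower() not in list1) and (not focus_mention.lower().endswith('\'s')) and (not focus_mention.lower().endswith('s')):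
--             has_processed = True
--             for mention in mention_set:
--                 if (mention.lower() in list1) or (mention.lower().endswith('\'s')) or (mention.lower().endswith('s')):
--                     continue
--
--                 if not focus_mention_contains_reflexive:
--                     mention_parts = mention.lower().split()
--                     mention_contains_reflexive = False
--                     for mention_part in mention_parts:
--                         if mention_part in list2:
--                             mention_contains_reflexive = True
--                             break
--                     if mention_contains_reflexive:
--                         continue
--                     else:
--                         updated_mention_set.append(mention.lower())
--         if not focus_mention_contains_reflexive:
--             has_processed = True
--             for mention in mention_set:
--                 mention_parts = mention.lower().split()
--                 mention_contains_reflexive = False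
--                 for mention_part in mention_parts:
--                     if mention_part  in list2:
--                         mention_contains_reflexive = True
--                         break
--                 if mention_contains_reflexive:
--                     continue
--                 else:
--                     if (focus_mention.lower() not in list1) and (not focus_mention.lower().endswith('\'s')) and (not focus_mention.lower().endswith('s')):
--                         if (mention.lower() in list1) or (mention.lower().endswith('\'s')) or (mention.lower().endswith('s')):
--                             continue
--                         else:
--                             if mention.lower() not in updated_mention_set:
--                                 updated_mention_set.append(mention.lower())
--         if not has_processed:
--             updated_mention_set = mention_set
--
--     return updated_mention_set
-- ===== SOURCE B (Python) =====
-- # B: table-driven reformulation — encode each word as a 5-bit feature mask and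
-- # decide keep/drop with per-category (require, forbid) masks from a lookup table,
-- # replacing A's five hand-written branch loops (and its quadratic else-branch rescan).
-- L1 = ['his', 'her', 'our', 'their']
-- L2 = ['himself', 'herself', 'ourselves', 'themselves']
-- L3 = ['you', 'he', 'she', 'we', 'they']
-- L4 = ['you', 'him', 'her', 'us', 'them']
--
--
-- def _poss(w):
--     return w in L1 or w.endswith('s') or w.endswith("'s")
--
--
-- def _refl(w):
--     return any(t in L2 for t in w.split())
--
--
-- def _feat(w):
--     b = 0
--     if _poss(w):
--         b |= 1
--     if w in L2:
--         b |= 2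
--     if _refl(w):
--         b |= 4
--     if w in L3:
--         b |= 8
--     if w in L4:
--         b |= 16
--     return b
--
--
-- REQ = (1, 2, 0, 0, 0)
-- FORB = (0, 0, 23, 11, 5)
--
--
-- def prune_mention_set_dev(mention_set, focus_mention):
--     ff = _feat(focus_mention.lower())
--     if ff & 1 != 0:
--         cat = 0
--     elif ff & 4 != 0:
--         cat = 1
--     elif ff & 8 != 0:
--         cat = 2
--     elif ff & 16 != 0:
--         cat = 3
--     else:
--         cat = 4
--     req = REQ[cat]
--     forb = FORB[cat]
--     out = []
--     for m in mention_set: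
--         w = m.lower()
--         b = _feat(w)
--         if (b & req) == req and (b & forb) == 0:
--             out.append(w)
--     return out
-- ===== Notes on version B (the rewrite author's own statement) =====
-- stated objective: faster
-- what changed: B is table-driven: it encodes every word as a 5-bit feature mask, classifies the focus mention into one of five categories, and keeps a mention iff its mask satisfies the category's (require, forbid) masks from a lookup table, replacing A's five hand-written branch loops (including the else-branch's redundant second pass with its membership rescan over the growing output).
import Mathlib
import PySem

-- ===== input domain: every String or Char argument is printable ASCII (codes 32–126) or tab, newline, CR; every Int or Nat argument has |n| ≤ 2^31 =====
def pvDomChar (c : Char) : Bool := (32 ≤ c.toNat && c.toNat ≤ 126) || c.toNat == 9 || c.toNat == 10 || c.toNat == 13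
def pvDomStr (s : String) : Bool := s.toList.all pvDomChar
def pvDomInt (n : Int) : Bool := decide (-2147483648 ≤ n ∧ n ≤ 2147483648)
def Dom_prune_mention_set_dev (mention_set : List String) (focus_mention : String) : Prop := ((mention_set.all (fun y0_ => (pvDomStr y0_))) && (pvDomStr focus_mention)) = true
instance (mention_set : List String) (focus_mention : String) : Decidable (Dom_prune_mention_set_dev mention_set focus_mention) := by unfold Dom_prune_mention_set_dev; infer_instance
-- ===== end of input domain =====

-- B replaces A's five duplicated branch loops by a table-driven pass: each word is
-- encoded as a 5-bit feature mask and kept iff it satisfies the focus category's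
-- (require, forbid) masks from a lookup table (objective: alternative decomposition).

def pvList1 : List String := ["his", "her", "our", "their"]
def pvList2 : List String := ["himself", "herself", "ourselves", "themselves"]
def pvList3 : List String := ["you", "he", "she", "we", "they"]
def pvList4 : List String := ["you", "him", "her", "us", "them"]

-- ===== PORT A =====
-- A's repeated condition "m in list1 or m.endswith(\"'s\") or m.endswith('s')", same order as A
def pvPossA (w : String) : Bool :=
  pvList1.contains w || PySem.Str.endswith w "'s" || PySem.Str.endswith w "s"

-- A's break-loop over split parts looking for a reflexive
def pvReflLoopA : List String → Bool
  | [] => false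
  | p :: rest => if pvList2.contains p then true else pvReflLoopA rest

def prune_mention_set_dev (mention_set : List String) (focus_mention : String) : List String :=
  let fl := PySem.Str.lower focus_mention
  let fcr := pvReflLoopA (PySem.Str.split₀ fl)
  if pvPossA fl then
    mention_set.foldl (fun acc m =>
      if pvPossA (PySem.Str.lower m) then acc ++ [PySem.Str.lower m] else acc) []
  else if fcr then
    mention_set.foldl (fun acc m =>
      if pvList2.contains (PySem.Str.lower m) then acc ++ [PySem.Str.lower m] else acc) []
  else if pvList3.contains fl then
    mention_set.foldl (fun acc m =>
      let mcr := pvReflLoopA (PySem.Str.split₀ (PySem.Str.lower m))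
      if pvPossA (PySem.Str.lower m) || pvList2.contains (PySem.Str.lower m)
          || pvList4.contains (PySem.Str.lower m) then acc
      else if mcr then acc
      else acc ++ [PySem.Str.lower m]) []
  else if pvList4.contains fl then
    mention_set.foldl (fun acc m =>
      if pvPossA (PySem.Str.lower m) || pvList2.contains (PySem.Str.lower m)
          || pvList3.contains (PySem.Str.lower m) then acc
      else acc ++ [PySem.Str.lower m]) []
  else
    -- Python's trailing else: two guarded passes plus the has_processed flag
    let st1 : List String × Bool :=
      if !pvPossA fl then
        (mention_set.foldl (fun acc m =>
          if pvPossA (PySem.Str.lower m) then acc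
          else if !fcr then
            (if pvReflLoopA (PySem.Str.split₀ (PySem.Str.lower m)) then acc
             else acc ++ [PySem.Str.lower m])
          else acc) [], true)
      else ([], false)
    let st2 : List String × Bool :=
      if !fcr then
        (mention_set.foldl (fun acc m =>
          if pvReflLoopA (PySem.Str.split₀ (PySem.Str.lower m)) then acc
          else if !pvPossA fl then
            (if pvPossA (PySem.Str.lower m) then acc
             else if acc.contains (PySem.Str.lower m) then acc
             else acc ++ [PySem.Str.lower m]) 
          else acc) st1.1, true)
      else st1
    if !st2.2 then mention_set else st2.1

-- ===== PORT B =====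
def pvPossB (w : String) : Bool :=
  pvList1.contains w || PySem.Str.endswith w "s" || PySem.Str.endswith w "'s"

def pvReflB (w : String) : Bool :=
  (PySem.Str.split₀ w).any (fun t => pvList2.contains t)

-- _feat: the 5-bit feature mask of a lowered word
def pvFeat (w : String) : Nat :=
  let b : Nat := 0
  let b := if pvPossB w then b ||| 1 else b
  let b := if pvList2.contains w then b ||| 2 else b
  let b := if pvReflB w then b ||| 4 else b
  let b := if pvList3.contains w then b ||| 8 else b
  let b := if pvList4.contains w then b ||| 16 else b
  b

def pvREQ : List Nat := [1, 2, 0, 0, 0]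
def pvFORB : List Nat := [0, 0, 23, 11, 5]

def prune_mention_set_dev_alt (mention_set : List String) (focus_mention : String) : List String :=
  let ff := pvFeat (PySem.Str.lower focus_mention)
  let cat : Nat :=
    if ff &&& 1 != 0 then 0
    else if ff &&& 4 != 0 then 1
    else if ff &&& 8 != 0 then 2
    else if ff &&& 16 != 0 then 3
    else 4
  let req := pvREQ.getD cat 0    -- REQ[cat]; cat is always 0..4, in range
  let forb := pvFORB.getD cat 0  -- FORB[cat]
  mention_set.foldl (fun out m =>
    if (pvFeat (PySem.Str.lower m) &&& req == req)
        && (pvFeat (PySem.Str.lower m) &&& forb == 0) then out ++ [PySem.Str.lower m]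
    else out) []

-- ===== PRECONDITION & SPEC =====
def Spec_prune_mention_set_dev (mention_set : List String) (focus_mention : String) (out : List String) : Prop := out = prune_mention_set_dev_alt mention_set focus_mention
instance (mention_set : List String) (focus_mention : String) (out : List String) : Decidable (Spec_prune_mention_set_dev mention_set focus_mention out) := by unfold Spec_prune_mention_set_dev; infer_instance

-- ===== CLAIM (what is proved, stated in full; the proofs are below) =====
def Claim_equal_prune_mention_set_dev : Prop := ∀ (mention_set : List String) (focus_mention : String), Dom_prune_mention_set_dev mention_set focus_mention → Spec_prune_mention_set_dev mention_set focus_mention (prune_mention_set_dev mention_set focus_mention)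

-- ===== LEMMAS AND PROOFS =====

theorem pvPoss_eq (w : String) : pvPossA w = pvPossB w := by
  simp [pvPossA, pvPossB, Bool.or_assoc, Bool.or_comm, Bool.or_left_comm]

theorem pvReflLoopA_eq_any (l : List String) :
    pvReflLoopA l = l.any (fun t => pvList2.contains t) := by
  induction l with
  | nil => rfl
  | cons h t ih =>
    by_cases hc : h ∈ pvList2 <;> simp [pvReflLoopA, hc, ih]

theorem pvRefl_eq (w : String) :
    pvReflLoopA (PySem.Str.split₀ w) = pvReflB w := by
  simp [pvReflB, pvReflLoopA_eq_any]

-- a member of list2 is a single word, hence its own split token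
theorem mem_list2_refl (w : String) (h : w ∈ pvList2) : pvReflB w = true := by
  simp [pvList2] at h
  rcases h with h | h | h | h <;> subst h <;> decide

-- bit-extraction lemmas for pvFeat
theorem feat_bit1 (w : String) : (pvFeat w &&& 1 != 0) = pvPossB w := by
  by_cases hP : pvPossB w = true <;> by_cases h2 : w ∈ pvList2 <;>
    by_cases hR : pvReflB w = true <;> by_cases h3 : w ∈ pvList3 <;>
    by_cases h4 : w ∈ pvList4 <;> simp_all [pvFeat]

theorem feat_bit4 (w : String) : (pvFeat w &&& 4 != 0) = pvReflB w := by
  by_cases hP : pvPossB w = true <;> by_cases h2 : w ∈ pvList2 <;>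
    by_cases hR : pvReflB w = true <;> by_cases h3 : w ∈ pvList3 <;>
    by_cases h4 : w ∈ pvList4 <;> simp_all [pvFeat]

theorem feat_bit8 (w : String) : (pvFeat w &&& 8 != 0) = pvList3.contains w := by
  by_cases hP : pvPossB w = true <;> by_cases h2 : w ∈ pvList2 <;>
    by_cases hR : pvReflB w = true <;> by_cases h3 : w ∈ pvList3 <;>
    by_cases h4 : w ∈ pvList4 <;> simp_all [pvFeat]

theorem feat_bit16 (w : String) : (pvFeat w &&& 16 != 0) = pvList4.contains w := by
  by_cases hP : pvPossB w = true <;> by_cases h2 : w ∈ pvList2 <;>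
    by_cases hR : pvReflB w = true <;> by_cases h3 : w ∈ pvList3 <;>
    by_cases h4 : w ∈ pvList4 <;> simp_all [pvFeat]

-- the mask test for each category equals the corresponding predicate
theorem mask_cat0 (w : String) :
    ((pvFeat w &&& 1 == 1) && (pvFeat w &&& 0 == 0)) = pvPossB w := by
  by_cases hP : pvPossB w = true <;> by_cases h2 : w ∈ pvList2 <;>
    by_cases hR : pvReflB w = true <;> by_cases h3 : w ∈ pvList3 <;>
    by_cases h4 : w ∈ pvList4 <;> simp_all [pvFeat]

theorem mask_cat1 (w : String) :
    ((pvFeat w &&& 2 == 2) && (pvFeat w &&& 0 == 0)) = pvList2.contains w := by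
  by_cases hP : pvPossB w = true <;> by_cases h2 : w ∈ pvList2 <;>
    by_cases hR : pvReflB w = true <;> by_cases h3 : w ∈ pvList3 <;>
    by_cases h4 : w ∈ pvList4 <;> simp_all [pvFeat]

theorem mask_cat2 (w : String) (hcons : pvList2.contains w = true → pvReflB w = true) :
    ((pvFeat w &&& 0 == 0) && (pvFeat w &&& 23 == 0))
      = !(pvPossB w || pvList4.contains w || pvReflB w) := by
  by_cases hP : pvPossB w = true <;> by_cases h2 : w ∈ pvList2 <;>
    by_cases hR : pvReflB w = true <;> by_cases h3 : w ∈ pvList3 <;>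
    by_cases h4 : w ∈ pvList4 <;> simp_all [pvFeat]

theorem mask_cat3 (w : String) :
    ((pvFeat w &&& 0 == 0) && (pvFeat w &&& 11 == 0))
      = !(pvPossB w || pvList2.contains w || pvList3.contains w) := by
  by_cases hP : pvPossB w = true <;> by_cases h2 : w ∈ pvList2 <;>
    by_cases hR : pvReflB w = true <;> by_cases h3 : w ∈ pvList3 <;>
    by_cases h4 : w ∈ pvList4 <;> simp_all [pvFeat]

theorem mask_cat4 (w : String) :
    ((pvFeat w &&& 0 == 0) && (pvFeat w &&& 5 == 0)) = !(pvPossB w || pvReflB w) := by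
  by_cases hP : pvPossB w = true <;> by_cases h2 : w ∈ pvList2 <;>
    by_cases hR : pvReflB w = true <;> by_cases h3 : w ∈ pvList3 <;>
    by_cases h4 : w ∈ pvList4 <;> simp_all [pvFeat]

-- B's single loop as a filter over the lowered mentions
theorem fold_mask (req forb : Nat) (l : List String) (acc : List String) :
    l.foldl (fun out m =>
      if (pvFeat (PySem.Str.lower m) &&& req == req)
          && (pvFeat (PySem.Str.lower m) &&& forb == 0) then out ++ [PySem.Str.lower m]
      else out) acc
      = acc ++ (l.map PySem.Str.lower).filter
          (fun w => (pvFeat w &&& req == req) && (pvFeat w &&& forb == 0)) := by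
  induction l generalizing acc with
  | nil => simp
  | cons m t ih =>
    rw [List.foldl_cons, List.map_cons, List.filter_cons]
    by_cases hp : ((pvFeat (PySem.Str.lower m) &&& req == req)
        && (pvFeat (PySem.Str.lower m) &&& forb == 0)) = true
    · rw [if_pos hp, if_pos hp, ih]; simp
    · rw [if_neg hp, if_neg hp, ih]

-- A's branch loops as filters
theorem fold_b1 (l : List String) (acc : List String) :
    l.foldl (fun acc m => if pvPossB (PySem.Str.lower m) then acc ++ [PySem.Str.lower m] else acc) acc
      = acc ++ (l.map PySem.Str.lower).filter pvPossB := by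
  induction l generalizing acc with
  | nil => simp
  | cons m t ih =>
    rw [List.foldl_cons, List.map_cons, List.filter_cons]
    by_cases hp : pvPossB (PySem.Str.lower m) = true
    · rw [if_pos hp, if_pos hp, ih]; simp
    · rw [if_neg hp, if_neg hp, ih]

theorem fold_b2 (l : List String) (acc : List String) :
    l.foldl (fun acc m => if pvList2.contains (PySem.Str.lower m) then acc ++ [PySem.Str.lower m] else acc) acc
      = acc ++ (l.map PySem.Str.lower).filter (fun w => pvList2.contains w) := by
  induction l generalizing acc with
  | nil => simp
  | cons m t ih =>
    rw [List.foldl_cons, List.map_cons, List.filter_cons]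
    by_cases hp : pvList2.contains (PySem.Str.lower m) = true
    · rw [if_pos hp, if_pos hp, ih]; simp
    · rw [if_neg hp, if_neg hp, ih]

theorem fold_b3 (l : List String) (acc : List String) :
    l.foldl (fun acc m =>
      if pvPossB (PySem.Str.lower m) || pvList2.contains (PySem.Str.lower m)
          || pvList4.contains (PySem.Str.lower m) then acc
      else if pvReflB (PySem.Str.lower m) then acc
      else acc ++ [PySem.Str.lower m]) acc
      = acc ++ (l.map PySem.Str.lower).filter
          (fun w => !(pvPossB w || pvList4.contains w || pvReflB w)) := by
  induction l generalizing acc with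
  | nil => simp
  | cons m t ih =>
    rw [List.foldl_cons, List.map_cons, List.filter_cons]
    by_cases hP : pvPossB (PySem.Str.lower m) = true
    · rw [if_pos (by simp [hP]), if_neg (by simp [hP]), ih]
    · by_cases h2 : PySem.Str.lower m ∈ pvList2
      · have hr := mem_list2_refl _ h2
        rw [if_pos (by simp [h2]), if_neg (by simp [hr]), ih]
      · by_cases h4 : PySem.Str.lower m ∈ pvList4
        · rw [if_pos (by simp [h4]), if_neg (by simp [h4]), ih]
        · by_cases hr : pvReflB (PySem.Str.lower m) = true
          · rw [if_neg (by simp [hP, h2, h4]), if_pos hr, if_neg (by simp [hr]), ih]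
          · rw [if_neg (by simp [hP, h2, h4]), if_neg hr,
              if_pos (by simp [hP, h4, hr]), ih]
            simp

theorem fold_b4 (l : List String) (acc : List String) :
    l.foldl (fun acc m =>
      if pvPossB (PySem.Str.lower m) || pvList2.contains (PySem.Str.lower m)
          || pvList3.contains (PySem.Str.lower m) then acc
      else acc ++ [PySem.Str.lower m]) acc
      = acc ++ (l.map PySem.Str.lower).filter
          (fun w => !(pvPossB w || pvList2.contains w || pvList3.contains w)) := by
  induction l generalizing acc with
  | nil => simp
  | cons m t ih =>
    rw [List.foldl_cons, List.map_cons, List.filter_cons]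
    by_cases hP : pvPossB (PySem.Str.lower m) = true
    · rw [if_pos (by simp [hP]), if_neg (by simp [hP]), ih]
    · by_cases h2 : PySem.Str.lower m ∈ pvList2
      · rw [if_pos (by simp [h2]), if_neg (by simp [h2]), ih]
      · by_cases h3 : PySem.Str.lower m ∈ pvList3
        · rw [if_pos (by simp [h3]), if_neg (by simp [h3]), ih]
        · rw [if_neg (by simp [hP, h2, h3]), if_pos (by simp [hP, h2, h3]), ih]
          simp

-- A's else branch, first pass
theorem fold_e1 (l : List String) (acc : List String) :
    l.foldl (fun acc m =>
      if pvPossB (PySem.Str.lower m) then acc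
      else if pvReflB (PySem.Str.lower m) then acc
      else acc ++ [PySem.Str.lower m]) acc
      = acc ++ (l.map PySem.Str.lower).filter (fun w => !(pvPossB w || pvReflB w)) := by
  induction l generalizing acc with
  | nil => simp
  | cons m t ih =>
    rw [List.foldl_cons, List.map_cons, List.filter_cons]
    by_cases hp : pvPossB (PySem.Str.lower m) = true
    · rw [if_pos hp, if_neg (by simp [hp]), ih]
    · by_cases hr : pvReflB (PySem.Str.lower m) = true
      · rw [if_neg hp, if_pos hr, if_neg (by simp [hr]), ih]
      · rw [if_neg hp, if_neg hr, if_pos (by simp [hp, hr]), ih]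
        simp

-- A's else branch: the second pass adds nothing once every candidate is already present
theorem fold_e2_noop (l : List String) (acc : List String)
    (h : ∀ m ∈ l, pvReflB (PySem.Str.lower m) = false → pvPossB (PySem.Str.lower m) = false →
          PySem.Str.lower m ∈ acc) :
    l.foldl (fun acc m =>
      if pvReflB (PySem.Str.lower m) then acc
      else if pvPossB (PySem.Str.lower m) then acc
      else if acc.contains (PySem.Str.lower m) then acc
      else acc ++ [PySem.Str.lower m]) acc = acc := by
  induction l with
  | nil => rfl
  | cons m t ih =>
    have hstep :
        (if pvReflB (PySem.Str.lower m) then acc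
         else if pvPossB (PySem.Str.lower m) then acc
         else if acc.contains (PySem.Str.lower m) then acc
         else acc ++ [PySem.Str.lower m]) = acc := by
      by_cases hr : pvReflB (PySem.Str.lower m) = true
      · rw [if_pos hr]
      · by_cases hp : pvPossB (PySem.Str.lower m) = true
        · rw [if_neg hr, if_pos hp]
        · have hmem := h m (by simp) (by simpa using hr) (by simpa using hp)
          rw [if_neg hr, if_neg hp, if_pos (by simpa using hmem)]
    rw [List.foldl_cons, hstep]
    exact ih (fun m' hm' => h m' (by simp [hm']))

-- ===== VERDICT (by name: the statement is the Claim_ definition above) =====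
theorem prune_mention_set_dev_spec : Claim_equal_prune_mention_set_dev := by
  intro ms fm _
  show prune_mention_set_dev ms fm = prune_mention_set_dev_alt ms fm
  unfold prune_mention_set_dev prune_mention_set_dev_alt
  simp only [pvRefl_eq, pvPoss_eq, feat_bit1, feat_bit4, feat_bit8, feat_bit16]
  by_cases h1 : pvPossB (PySem.Str.lower fm) = true
  · simp only [h1, reduceIte]
    rw [fold_b1, fold_mask, List.nil_append, List.nil_append]
    exact (List.filter_congr (fun w _ => (mask_cat0 w).symm)).symm ▸ rfl
  · have h1' : pvPossB (PySem.Str.lower fm) = false := by simpa using h1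
    simp only [h1', Bool.false_eq_true, reduceIte]
    by_cases h2 : pvReflB (PySem.Str.lower fm) = true
    · simp only [h2, reduceIte]
      rw [fold_b2, fold_mask, List.nil_append, List.nil_append]
      exact List.filter_congr (fun w _ => (mask_cat1 w).symm)
    · have h2' : pvReflB (PySem.Str.lower fm) = false := by simpa using h2
      simp only [h2', Bool.false_eq_true, reduceIte]
      by_cases h3 : pvList3.contains (PySem.Str.lower fm) = true
      · simp only [h3, reduceIte]
        rw [fold_b3, fold_mask, List.nil_append, List.nil_append]
        refine List.filter_congr (fun w hw => ?_)
        exact (mask_cat2 w (fun hc => mem_list2_refl w (by simpa using hc))).symm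
      · have h3' : pvList3.contains (PySem.Str.lower fm) = false := by simpa using h3
        simp only [h3', Bool.false_eq_true, reduceIte]
        by_cases h4 : pvList4.contains (PySem.Str.lower fm) = true
        · simp only [h4, reduceIte]
          rw [fold_b4, fold_mask, List.nil_append, List.nil_append]
          exact List.filter_congr (fun w _ => (mask_cat3 w).symm)
        · have h4' : pvList4.contains (PySem.Str.lower fm) = false := by simpa using h4
          simp only [h4', Bool.false_eq_true, Bool.not_false, Bool.not_true,
            reduceIte]
          rw [fold_e1, List.nil_append, fold_e2_noop, fold_mask, List.nil_append]
          · exact List.filter_congr (fun w _ => (mask_cat4 w).symm)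
          · intro m hm hr hp
            rw [List.mem_filter]
            exact ⟨List.mem_map.mpr ⟨m, hm, rfl⟩, by simp [hr, hp]⟩
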